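-- pv_equiv track=rewrite | github.com/kshitij2k4/studymatgen | youtube-summarizer/app.py | format_selective_study_material
-- ===== SOURCE A (Python) =====
-- from typing import Optional, List, Dict
--
-- def format_selective_study_material(sections: Dict[str, str], topic_title: str) -> str:
--     """Format selected sections into a complete study material document"""
--
--     formatted_content = f"# {topic_title}\n\n"
--
--     # Add sections in a logical order
--     section_order = [
--         ('overview', '## Overview'),
--         ('learning_outcomes', '## Learning Outcomes'),
--         ('concept_explanation', '### Concept Explanation'),
--         ('examples', '### Examples'),
--         ('case_studies', '### Case Studies / Scenarios'),
--         ('key_takeaways', '## Key Takeaways'),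
--         ('practice_exercises', '### Practice Exercises / Activities'),
--         ('quiz_questions', '### Quizzes / Self-Assessment')
--     ]
--
--     main_content_added = False
--     learning_activities_added = False
--
--     for section_key, section_header in section_order:
--         if section_key in sections and sections[section_key]:
--             # Add main content header if we're adding concept explanations, examples, or case studies
--             if section_key in ['concept_explanation', 'examples', 'case_studies'] and not main_content_added:
--                 formatted_content += "## Main Contents\n\n"
--                 main_content_added = True
--
--             # Add learning activities header if we're adding exercises or quizzes
--             if section_key in ['practice_exercises', 'quiz_questions'] and not learning_activities_added:
--                 formatted_content += "## Learning Activities\n\n"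
--                 learning_activities_added = True
--
--             formatted_content += f"{section_header}\n{sections[section_key]}\n\n"
--
--     formatted_content += "---\n*Generated using AI-powered Educational Content Generator*\n"
--
--     return formatted_content
-- ===== SOURCE B (Python) =====
-- def format_selective_study_material(sections, topic_title):
--     """Format selected sections into a complete study material document"""
--     groups = [
--         (None, [('overview', '## Overview'),
--                 ('learning_outcomes', '## Learning Outcomes')]),
--         ('## Main Contents', [('concept_explanation', '### Concept Explanation'),
--                               ('examples', '### Examples'),
--                               ('case_studies', '### Case Studies / Scenarios')]),
--         (None, [('key_takeaways', '## Key Takeaways')]),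
--         ('## Learning Activities', [('practice_exercises', '### Practice Exercises / Activities'),
--                                     ('quiz_questions', '### Quizzes / Self-Assessment')]),
--     ]
--     parts = [f"# {topic_title}\n\n"]
--     for group_header, secs in groups:
--         present = [(header, sections[key]) for key, header in secs if sections.get(key)]
--         if present:
--             if group_header is not None:
--                 parts.append(f"{group_header}\n\n")
--             parts.extend(f"{header}\n{content}\n\n" for header, content in present)
--     parts.append("---\n*Generated using AI-powered Educational Content Generator*\n")
--     return "".join(parts)
-- ===== Notes on version B (the rewrite author's own statement) =====
-- stated objective: alternative
-- what changed: Replaces A's single flag-threading loop (main_content_added/learning_activities_added booleans) by a declarative table of section groups (optional group header + member sections): each group first filters its present sections, emits the group header only if any remain, and the document is the join of the parts.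
import Mathlib
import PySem

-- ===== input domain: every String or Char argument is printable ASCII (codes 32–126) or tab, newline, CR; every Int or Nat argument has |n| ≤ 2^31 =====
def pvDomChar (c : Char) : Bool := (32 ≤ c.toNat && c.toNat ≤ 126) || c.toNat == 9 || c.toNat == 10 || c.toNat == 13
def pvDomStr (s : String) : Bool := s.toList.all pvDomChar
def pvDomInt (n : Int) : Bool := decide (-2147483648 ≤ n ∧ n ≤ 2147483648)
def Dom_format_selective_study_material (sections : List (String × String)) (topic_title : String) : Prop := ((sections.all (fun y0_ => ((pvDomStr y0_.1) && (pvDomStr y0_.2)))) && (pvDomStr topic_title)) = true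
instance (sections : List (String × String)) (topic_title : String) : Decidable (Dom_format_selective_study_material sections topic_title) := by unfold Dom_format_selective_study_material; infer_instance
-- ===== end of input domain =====

-- B replaces A's flag-threading loop by a declarative list of section GROUPS (optional group
-- header + member sections) emitted group by group; same output, objective 'alternative'.

-- ===== PORT A =====
-- A's fixed section order
def fssmOrder : List (String × String) :=
  [("overview", "## Overview"),
   ("learning_outcomes", "## Learning Outcomes"),
   ("concept_explanation", "### Concept Explanation"),
   ("examples", "### Examples"),
   ("case_studies", "### Case Studies / Scenarios"),
   ("key_takeaways", "## Key Takeaways"),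
   ("practice_exercises", "### Practice Exercises / Activities"),
   ("quiz_questions", "### Quizzes / Self-Assessment")]

-- one iteration of A's loop; state = (formatted_content, main_content_added, learning_activities_added)
def fssmStep (sections : List (String × String)) (st : String × Bool × Bool) (kv : String × String) : String × Bool × Bool :=
  match (PySem.Dict.mk sections).get? kv.1 with
  | some v =>
    if v ≠ "" then
      let mcCond := (kv.1 == "concept_explanation" || kv.1 == "examples" || kv.1 == "case_studies") && !st.2.1
      let content₁ := if mcCond then st.1 ++ "## Main Contents\n\n" else st.1
      let mc₁ := if mcCond then true else st.2.1
      let laCond := (kv.1 == "practice_exercises" || kv.1 == "quiz_questions") && !st.2.2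
      let content₂ := if laCond then content₁ ++ "## Learning Activities\n\n" else content₁
      let la₁ := if laCond then true else st.2.2
      (content₂ ++ kv.2 ++ "\n" ++ v ++ "\n\n", mc₁, la₁)
    else st
  | none => st

def format_selective_study_material (sections : List (String × String)) (topic_title : String) : String :=
  (fssmOrder.foldl (fssmStep sections) ("# " ++ topic_title ++ "\n\n", false, false)).1 ++
    "---\n*Generated using AI-powered Educational Content Generator*\n"

-- ===== PORT B =====
-- B's group table: (optional group header, member sections as (key, section header))
def fssmGroups : List (Option String × List (String × String)) :=
  [(none, [("overview", "## Overview"), ("learning_outcomes", "## Learning Outcomes")]),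
   (some "## Main Contents",
     [("concept_explanation", "### Concept Explanation"),
      ("examples", "### Examples"),
      ("case_studies", "### Case Studies / Scenarios")]),
   (none, [("key_takeaways", "## Key Takeaways")]),
   (some "## Learning Activities",
     [("practice_exercises", "### Practice Exercises / Activities"),
      ("quiz_questions", "### Quizzes / Self-Assessment")])]

-- '(header, sections[key]) for key, header in secs if sections.get(key)' for one section
def fssmRenderSec (sections : List (String × String)) (kv : String × String) : Option (String × String) :=
  match (PySem.Dict.mk sections).get? kv.1 with
  | some v => if v ≠ "" then some (kv.2, v) else none
  | none => none

-- the parts one group contributes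
def fssmGroupParts (sections : List (String × String)) (g : Option String × List (String × String)) : List String :=
  let present := g.2.filterMap (fssmRenderSec sections)
  if present.isEmpty then []
  else (match g.1 with | some h => [h ++ "\n\n"] | none => []) ++
       present.map (fun hv => hv.1 ++ "\n" ++ hv.2 ++ "\n\n")

def format_selective_study_material_alt (sections : List (String × String)) (topic_title : String) : String :=
  PySem.Str.join ""
    (["# " ++ topic_title ++ "\n\n"] ++
     (fssmGroups.map (fssmGroupParts sections)).flatten ++
     ["---\n*Generated using AI-powered Educational Content Generator*\n"])

-- ===== PRECONDITION & SPEC =====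
def Spec_format_selective_study_material (sections : List (String × String)) (topic_title : String) (out : String) : Prop := out = format_selective_study_material_alt sections topic_title
instance (sections : List (String × String)) (topic_title : String) (out : String) : Decidable (Spec_format_selective_study_material sections topic_title out) := by unfold Spec_format_selective_study_material; infer_instance

-- ===== CLAIM (what is proved, stated in full; the proofs are below) =====
def Claim_equal_format_selective_study_material : Prop := ∀ (sections : List (String × String)) (topic_title : String), Dom_format_selective_study_material sections topic_title → Spec_format_selective_study_material sections topic_title (format_selective_study_material sections topic_title)

-- ===== LEMMAS AND PROOFS =====
-- truthy presence of a key, and its value with default ""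
def fssmPres (sections : List (String × String)) (k : String) : Bool :=
  match (PySem.Dict.mk sections).get? k with
  | some v => v ≠ ""
  | none => false

def fssmValD (sections : List (String × String)) (k : String) : String :=
  ((PySem.Dict.mk sections).get? k).getD ""

theorem fssmStep_eq (s : List (String × String)) (st : String × Bool × Bool) (kv : String × String) :
    fssmStep s st kv =
      if fssmPres s kv.1 then
        let mcCond := (kv.1 == "concept_explanation" || kv.1 == "examples" || kv.1 == "case_studies") && !st.2.1
        let content₁ := if mcCond then st.1 ++ "## Main Contents\n\n" else st.1
        let mc₁ := if mcCond then true else st.2.1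
        let laCond := (kv.1 == "practice_exercises" || kv.1 == "quiz_questions") && !st.2.2
        let content₂ := if laCond then content₁ ++ "## Learning Activities\n\n" else content₁
        let la₁ := if laCond then true else st.2.2
        (content₂ ++ kv.2 ++ "\n" ++ fssmValD s kv.1 ++ "\n\n", mc₁, la₁)
      else st := by
  unfold fssmStep fssmPres fssmValD
  cases h : (PySem.Dict.mk s).get? kv.1 <;> simp

theorem fssmRenderSec_eq (s : List (String × String)) (kv : String × String) :
    fssmRenderSec s kv = if fssmPres s kv.1 then some (kv.2, fssmValD s kv.1) else none := by
  unfold fssmRenderSec fssmPres fssmValD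
  cases h : (PySem.Dict.mk s).get? kv.1 <;> simp

theorem fssmFlattenInterNil (xs : List (List Char)) : (List.intersperse [] xs).flatten = xs.flatten := by
  induction xs with
  | nil => rfl
  | cons a t ih => cases t <;> simp_all [List.intersperse]

theorem fssmJoinNil : PySem.Str.join "" ([] : List String) = "" := by decide

theorem fssmJoinCons (x : String) (xs : List String) :
    PySem.Str.join "" (x :: xs) = x ++ PySem.Str.join "" xs := by
  refine String.toList_inj.mp ?_
  simp [PySem.Str.join, PySem.Chars.join, List.intercalate, fssmFlattenInterNil]

theorem fssmJoinAppend (xs ys : List String) :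
    PySem.Str.join "" (xs ++ ys) = PySem.Str.join "" xs ++ PySem.Str.join "" ys := by
  induction xs with
  | nil => simp [fssmJoinNil]
  | cons a t ih => simp [fssmJoinCons, ih, String.append_assoc]

theorem fssmG1 (s : List (String × String)) (acc : String) (mc la : Bool) :
    List.foldl (fssmStep s) (acc, mc, la)
      [("overview", "## Overview"), ("learning_outcomes", "## Learning Outcomes")]
    = (acc ++ PySem.Str.join "" (fssmGroupParts s
        (none, [("overview", "## Overview"), ("learning_outcomes", "## Learning Outcomes")])), mc, la) := by
  simp only [List.foldl_cons, List.foldl_nil, fssmStep_eq, fssmGroupParts,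
    List.filterMap_cons, List.filterMap_nil, fssmRenderSec_eq]
  generalize fssmPres s "overview" = b1
  generalize fssmPres s "learning_outcomes" = b2
  cases b1 <;> cases b2 <;> simp [fssmJoinCons, fssmJoinNil, ← String.toList_inj, List.append_assoc]

theorem fssmG2 (s : List (String × String)) (acc : String) (la : Bool) :
    List.foldl (fssmStep s) (acc, false, la)
      [("concept_explanation", "### Concept Explanation"),
       ("examples", "### Examples"),
       ("case_studies", "### Case Studies / Scenarios")]
    = (acc ++ PySem.Str.join "" (fssmGroupParts s
        (some "## Main Contents",
         [("concept_explanation", "### Concept Explanation"),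
          ("examples", "### Examples"),
          ("case_studies", "### Case Studies / Scenarios")])),
       fssmPres s "concept_explanation" || fssmPres s "examples" || fssmPres s "case_studies", la) := by
  simp only [List.foldl_cons, List.foldl_nil, fssmStep_eq, fssmGroupParts,
    List.filterMap_cons, List.filterMap_nil, fssmRenderSec_eq]
  generalize fssmPres s "concept_explanation" = b1
  generalize fssmPres s "examples" = b2
  generalize fssmPres s "case_studies" = b3
  cases b1 <;> cases b2 <;> cases b3 <;> simp [fssmJoinCons, fssmJoinNil, ← String.toList_inj, List.append_assoc]

theorem fssmG3 (s : List (String × String)) (acc : String) (mc la : Bool) :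
    List.foldl (fssmStep s) (acc, mc, la) [("key_takeaways", "## Key Takeaways")]
    = (acc ++ PySem.Str.join "" (fssmGroupParts s (none, [("key_takeaways", "## Key Takeaways")])), mc, la) := by
  simp only [List.foldl_cons, List.foldl_nil, fssmStep_eq, fssmGroupParts,
    List.filterMap_cons, List.filterMap_nil, fssmRenderSec_eq]
  generalize fssmPres s "key_takeaways" = b1
  cases b1 <;> simp [fssmJoinCons, fssmJoinNil, ← String.toList_inj, List.append_assoc]

theorem fssmG4 (s : List (String × String)) (acc : String) (mc : Bool) :
    List.foldl (fssmStep s) (acc, mc, false)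
      [("practice_exercises", "### Practice Exercises / Activities"),
       ("quiz_questions", "### Quizzes / Self-Assessment")]
    = (acc ++ PySem.Str.join "" (fssmGroupParts s
        (some "## Learning Activities",
         [("practice_exercises", "### Practice Exercises / Activities"),
          ("quiz_questions", "### Quizzes / Self-Assessment")])),
       mc, fssmPres s "practice_exercises" || fssmPres s "quiz_questions") := by
  simp only [List.foldl_cons, List.foldl_nil, fssmStep_eq, fssmGroupParts,
    List.filterMap_cons, List.filterMap_nil, fssmRenderSec_eq]
  generalize fssmPres s "practice_exercises" = b1
  generalize fssmPres s "quiz_questions" = b2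
  cases b1 <;> cases b2 <;> simp [fssmJoinCons, fssmJoinNil, ← String.toList_inj, List.append_assoc]

-- ===== VERDICT (by name: the statement is the Claim_ definition above) =====
theorem format_selective_study_material_spec : Claim_equal_format_selective_study_material := by
  intro s t _
  unfold Spec_format_selective_study_material
  unfold format_selective_study_material format_selective_study_material_alt
  rw [show fssmOrder =
      [("overview", "## Overview"), ("learning_outcomes", "## Learning Outcomes")] ++
      ([("concept_explanation", "### Concept Explanation"),
        ("examples", "### Examples"),
        ("case_studies", "### Case Studies / Scenarios")] ++
       ([("key_takeaways", "## Key Takeaways")] ++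
        [("practice_exercises", "### Practice Exercises / Activities"),
         ("quiz_questions", "### Quizzes / Self-Assessment")])) from rfl]
  rw [List.foldl_append, List.foldl_append, List.foldl_append]
  rw [fssmG1, fssmG2, fssmG3, fssmG4]
  simp [fssmGroups, fssmJoinAppend, fssmJoinCons, fssmJoinNil, ← String.toList_inj, List.append_assoc]
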